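-- pv_equiv track=rewrite | github.com/InertiaUK/UKBinCollectionData | uk_bin_collection/uk_bin_collection/councils/LondonBoroughCamdenCouncil.py | _match_property
-- ===== SOURCE A (Python) =====
-- def _match_property(properties, uprn=None, paon=None):
--     """Match a property from search results by UPRN or house number/name."""
--     if uprn:
--         for prop in properties:
--             if str(prop.get("uprn", "")) == str(uprn):
--                 return prop["id"]
--
--     if paon:
--         paon_norm = str(paon).strip().upper()
--         # Exact start match (e.g. "12" matches "12 MABLEDON PLACE, ...")
--         for prop in properties:
--             name = str(prop.get("name", "")).upper()
--             if name.startswith(paon_norm + " ") or name.startswith(paon_norm + ","):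
--                 return prop["id"]
--         # Contains match (e.g. "FLAT 3" matches "FLAT 3, 12 MABLEDON PLACE, ...")
--         for prop in properties:
--             name = str(prop.get("name", "")).upper()
--             if paon_norm in name:
--                 return prop["id"]
--
--     return properties[0]["id"]
-- ===== SOURCE B (Python) =====
-- def _match_property(properties, uprn=None, paon=None):
--     """Match a property from search results by UPRN or house number/name."""
--     uprn_s = str(uprn) if uprn else None
--     paon_norm = str(paon).strip().upper() if paon else None
--     u_hit = s_hit = c_hit = None
--     for prop in properties:
--         if uprn_s is not None and u_hit is None and str(prop.get("uprn", "")) == uprn_s: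
--             u_hit = prop["id"]
--         if paon_norm is not None:
--             name = str(prop.get("name", "")).upper()
--             if s_hit is None and (name.startswith(paon_norm + " ") or name.startswith(paon_norm + ",")):
--                 s_hit = prop["id"]
--             if c_hit is None and paon_norm in name:
--                 c_hit = prop["id"]
--     if u_hit is not None:
--         return u_hit
--     if s_hit is not None:
--         return s_hit
--     if c_hit is not None:
--         return c_hit
--     return properties[0]["id"]
-- ===== Notes on version B (the rewrite author's own statement) =====
-- stated objective: alternative
-- what changed: Replaced A's three sequential early-return scans over properties by a single pass that records the first id matching each tier (uprn-equal, name-startswith, name-contains) and resolves the tier priority after the loop.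
import Mathlib
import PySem

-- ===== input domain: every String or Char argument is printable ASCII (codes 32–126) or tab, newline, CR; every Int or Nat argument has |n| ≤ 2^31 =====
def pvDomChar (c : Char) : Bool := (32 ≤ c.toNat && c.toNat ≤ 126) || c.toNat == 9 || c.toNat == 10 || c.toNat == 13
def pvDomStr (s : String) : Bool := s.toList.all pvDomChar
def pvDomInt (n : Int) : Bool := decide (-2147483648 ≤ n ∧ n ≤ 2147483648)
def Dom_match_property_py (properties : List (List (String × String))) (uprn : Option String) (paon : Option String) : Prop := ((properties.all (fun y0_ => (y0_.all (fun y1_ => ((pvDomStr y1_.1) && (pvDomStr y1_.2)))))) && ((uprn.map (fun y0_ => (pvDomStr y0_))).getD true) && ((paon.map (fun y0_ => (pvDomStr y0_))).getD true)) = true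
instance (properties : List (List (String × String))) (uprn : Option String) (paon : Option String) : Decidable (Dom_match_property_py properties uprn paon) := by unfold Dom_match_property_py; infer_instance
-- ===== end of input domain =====

-- B replaces A's three sequential early-return scans by ONE pass recording the first
-- match of each tier, with the tier priority resolved after the loop (same cost, different structure).

-- ===== PORT A =====
-- first loop of A: "for prop: if prop.get('uprn','') == uprn: return prop['id']"
def pvFindUprnA (u : String) : List (List (String × String)) → Option String
  | [] => none
  | p :: t =>
    if (PySem.Dict.mk p).getD "uprn" "" == u then some (((PySem.Dict.mk p).get? "id").getD "")
    else pvFindUprnA u t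

-- second loop of A: startswith(paon_norm + " ") or startswith(paon_norm + ",")
def pvFindStartA (q : String) : List (List (String × String)) → Option String
  | [] => none
  | p :: t =>
    let name := PySem.Str.upper ((PySem.Dict.mk p).getD "name" "")
    if PySem.Str.startswith name (q ++ " ") || PySem.Str.startswith name (q ++ ",") then
      some (((PySem.Dict.mk p).get? "id").getD "")
    else pvFindStartA q t

-- third loop of A: "paon_norm in name"
def pvFindContainsA (q : String) : List (List (String × String)) → Option String
  | [] => none
  | p :: t =>
    let name := PySem.Str.upper ((PySem.Dict.mk p).getD "name" "")
    if PySem.Str.isIn q name then some (((PySem.Dict.mk p).get? "id").getD "")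
    else pvFindContainsA q t

-- prop["id"] is ported as get? + getD ""; Pre_ excludes the inputs where Python raises (KeyError / IndexError)
def match_property_py (properties : List (List (String × String))) (uprn : Option String) (paon : Option String) : String :=
  let r1 : Option String :=
    match uprn with
    | some u => if u = "" then none else pvFindUprnA u properties   -- "if uprn:" (falsy on None and "")
    | none => none
  match r1 with
  | some r => r
  | none =>
    let r2 : Option String :=
      match paon with
      | some p0 =>
        if p0 = "" then none
        else
          let q := PySem.Str.upper (PySem.Str.strip p0)   -- paon_norm
          match pvFindStartA q properties with
          | some r => some r
          | none => pvFindContainsA q properties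
      | none => none
    match r2 with
    | some r => r
    | none => ((PySem.Dict.mk (properties.headD [])).get? "id").getD ""   -- properties[0]["id"]

-- ===== PORT B =====
-- single pass: record the first id matching each tier (u_hit, s_hit, c_hit)
def pvScanB (uo pn : Option String) : List (List (String × String)) → Option String × Option String × Option String → Option String × Option String × Option String
  | [], acc => acc
  | p :: t, (u, s, c) =>
    let d := PySem.Dict.mk p
    let u' : Option String :=
      match uo with
      | some us => if u.isNone && (d.getD "uprn" "" == us) then some ((d.get? "id").getD "") else u
      | none => u
    let sc : Option String × Option String :=
      match pn with
      | some q =>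
        let name := PySem.Str.upper (d.getD "name" "")
        (if s.isNone && (PySem.Str.startswith name (q ++ " ") || PySem.Str.startswith name (q ++ ",")) then
            some ((d.get? "id").getD "")
         else s,
         if c.isNone && PySem.Str.isIn q name then some ((d.get? "id").getD "") else c)
      | none => (s, c)
    pvScanB uo pn t (u', sc.1, sc.2)

def match_property_py_alt (properties : List (List (String × String))) (uprn : Option String) (paon : Option String) : String :=
  let uo : Option String :=
    match uprn with
    | some u => if u = "" then none else some u
    | none => none
  let pn : Option String :=
    match paon with
    | some p0 => if p0 = "" then none else some (PySem.Str.upper (PySem.Str.strip p0))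
    | none => none
  let res := pvScanB uo pn properties (none, none, none)
  match res.1 with
  | some r => r
  | none =>
    match res.2.1 with
    | some r => r
    | none =>
      match res.2.2 with
      | some r => r
      | none => ((PySem.Dict.mk (properties.headD [])).get? "id").getD ""

-- ===== PRECONDITION & SPEC =====
-- the property whose "id" the Python returns, stated declaratively (first match per tier via List.find?)
def pvSelected (properties : List (List (String × String))) (uprn : Option String) (paon : Option String) : List (String × String) :=
  let uo : Option String := match uprn with | some u => if u = "" then none else some u | none => none
  let pn : Option String := match paon with | some p0 => if p0 = "" then none else some (PySem.Str.upper (PySem.Str.strip p0)) | none => none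
  let m1 : Option (List (String × String)) := uo.bind (fun u =>
    properties.find? (fun p => (PySem.Dict.mk p).getD "uprn" "" == u))
  let m2 : Option (List (String × String)) := pn.bind (fun q =>
    properties.find? (fun p =>
      let name := PySem.Str.upper ((PySem.Dict.mk p).getD "name" "")
      PySem.Str.startswith name (q ++ " ") || PySem.Str.startswith name (q ++ ",")))
  let m3 : Option (List (String × String)) := pn.bind (fun q =>
    properties.find? (fun p => PySem.Str.isIn q (PySem.Str.upper ((PySem.Dict.mk p).getD "name" ""))))
  ((m1.or (m2.or m3)).getD (properties.headD []))

-- Pre_ excludes exactly the inputs on which the Python raises: an empty properties list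
-- (IndexError on properties[0]) or a selected property without an "id" key (KeyError).
def Pre_match_property_py (properties : List (List (String × String))) (uprn : Option String) (paon : Option String) : Prop :=
  properties ≠ [] ∧ (PySem.Dict.mk (pvSelected properties uprn paon)).contains "id" = true
instance (properties : List (List (String × String))) (uprn : Option String) (paon : Option String) : Decidable (Pre_match_property_py properties uprn paon) := by unfold Pre_match_property_py; infer_instance

def pvWitness_match_property_py : (List (List (String × String))) × Option String × Option String :=
  ([[("id", "1"), ("uprn", "100"), ("name", "12 MABLEDON PLACE")]], some "100", none)

def Spec_match_property_py (properties : List (List (String × String))) (uprn : Option String) (paon : Option String) (out : String) : Prop := out = match_property_py_alt properties uprn paon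
instance (properties : List (List (String × String))) (uprn : Option String) (paon : Option String) (out : String) : Decidable (Spec_match_property_py properties uprn paon out) := by unfold Spec_match_property_py; infer_instance

-- ===== CLAIM (what is proved, stated in full; the proofs are below) =====
def Claim_equal_match_property_py : Prop := ∀ (properties : List (List (String × String))) (uprn : Option String) (paon : Option String), Dom_match_property_py properties uprn paon → Pre_match_property_py properties uprn paon → Spec_match_property_py properties uprn paon (match_property_py properties uprn paon)

-- ===== LEMMAS AND PROOFS =====

def pvFU (uo : Option String) (ps : List (List (String × String))) : Option String :=
  match uo with
  | some u => pvFindUprnA u ps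
  | none => none

def pvFS (pn : Option String) (ps : List (List (String × String))) : Option String :=
  match pn with
  | some q => pvFindStartA q ps
  | none => none

def pvFC (pn : Option String) (ps : List (List (String × String))) : Option String :=
  match pn with
  | some q => pvFindContainsA q ps
  | none => none

theorem pvScanB_eq (uo pn : Option String) (ps : List (List (String × String)))
    (a b c : Option String) :
    pvScanB uo pn ps (a, b, c) = (a.or (pvFU uo ps), b.or (pvFS pn ps), c.or (pvFC pn ps)) := by
  induction ps generalizing a b c with
  | nil => simp [pvScanB, pvFU, pvFS, pvFC]; cases uo <;> cases pn <;> simp [pvFindUprnA, pvFindStartA, pvFindContainsA]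
  | cons p t ih =>
    simp only [pvScanB]
    rw [ih]
    congr 1
    · cases uo with
      | none => rfl
      | some us =>
        cases a with
        | some x => simp [pvFU, Option.or]
        | none =>
          simp only [pvFU, pvFindUprnA, Option.isNone, Bool.true_and]
          split <;> simp_all [Option.or]
    · congr 1
      · cases pn with
        | none => rfl
        | some q =>
          cases b with
          | some x => simp [pvFS, Option.or]
          | none =>
            simp only [pvFS, pvFindStartA, Option.isNone, Bool.true_and]
            split <;> simp_all [Option.or]
      · cases pn with
        | none => rfl
        | some q =>
          cases c with
          | some x => simp [pvFC, Option.or]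
          | none =>
            simp only [pvFC, pvFindContainsA, Option.isNone, Bool.true_and]
            split <;> simp_all [Option.or]

-- ===== VERDICT (by name: the statement is the Claim_ definition above) =====
theorem match_property_py_spec : Claim_equal_match_property_py := by
  intro properties uprn paon _ _
  unfold Spec_match_property_py match_property_py match_property_py_alt
  simp only [pvScanB_eq, Option.or]
  cases uprn with
  | none =>
    cases paon with
    | none => simp [pvFU, pvFS, pvFC]
    | some p0 =>
      by_cases hp : p0 = "" <;>
        simp [pvFU, pvFS, pvFC, hp] <;>
        cases pvFindStartA (PySem.Str.upper (PySem.Str.strip p0)) properties <;>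
        simp <;>
        cases pvFindContainsA (PySem.Str.upper (PySem.Str.strip p0)) properties <;> simp
  | some u =>
    by_cases hu : u = ""
    · cases paon with
      | none => simp [pvFU, pvFS, pvFC, hu]
      | some p0 =>
        by_cases hp : p0 = "" <;>
          simp [pvFU, pvFS, pvFC, hu, hp] <;>
          cases pvFindStartA (PySem.Str.upper (PySem.Str.strip p0)) properties <;>
          simp <;>
          cases pvFindContainsA (PySem.Str.upper (PySem.Str.strip p0)) properties <;> simp
    · simp only [pvFU, if_neg hu]
      cases hfu : pvFindUprnA u properties with
      | some r => simp only [hfu]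
      | none =>
        simp only [hfu]
        cases paon with
        | none => simp [pvFS, pvFC]
        | some p0 =>
          by_cases hp : p0 = "" <;>
            simp [pvFS, pvFC, hp] <;>
            cases pvFindStartA (PySem.Str.upper (PySem.Str.strip p0)) properties <;>
            simp <;>
            cases pvFindContainsA (PySem.Str.upper (PySem.Str.strip p0)) properties <;> simp
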